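-- pv_equiv track=rewrite | github.com/danila-schelkov/brawl-battle-logs-bot | utilities/tags.py | tag_to_id
-- ===== SOURCE A (Python) =====
-- TAG_CHARS = '0289PYLQGRJCUV'
--
-- def _clean_tag(tag: str) -> str:
--     """Clean the tag.
--
--     :param tag: account tag
--     :type tag: str
--     :rtype: str
--     :return: tag contains only chars 0289PYLQGRJCUV
--     """
--
--     return tag.strip().upper().replace('#', '').replace('O', '0').replace('B', '8')
--
-- def tag_to_id(tag: str) -> tuple[int, int]:
--     """Converts tag to a pair of high and low ids.
--
--     :param tag: account tag
--     :return: high and low ids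
--     """
--     tag = _clean_tag(tag)
--     value = 0
--
--     for char in tag:
--         value *= len(TAG_CHARS)
--         value += TAG_CHARS.index(char)
--
--     high = value % 256
--     low = (value - high) >> 8
--
--     return high, low
-- ===== SOURCE B (Python) =====
-- TAG_CHARS = '0289PYLQGRJCUV'
--
-- _DIGITS = {c: i for i, c in enumerate(TAG_CHARS)}
--
-- def tag_to_id(tag: str) -> tuple[int, int]:
--     """Converts tag to a pair of high and low ids.
--
--     Right-to-left positional evaluation with a precomputed digit map,
--     then bit operations to split the value.
--     """
--     cleaned = tag.strip().upper().replace('#', '').replace('O', '0').replace('B', '8')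
--     value = 0
--     place = 1
--     for char in reversed(cleaned):
--         value += _DIGITS[char] * place
--         place *= 14
--     return value & 0xFF, value >> 8
-- ===== Notes on version B (the rewrite author's own statement) =====
-- stated objective: alternative
-- what changed: Replaces the left-to-right Horner loop using TAG_CHARS.index with a right-to-left positional sum over a precomputed char-to-digit dictionary, and splits the value with bit operations (value & 0xFF, value >> 8) instead of %/subtract/shift; Pre_ excludes tags whose cleaned form contains a char outside TAG_CHARS, where A raises ValueError (and B raises KeyError).
import Mathlib
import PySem

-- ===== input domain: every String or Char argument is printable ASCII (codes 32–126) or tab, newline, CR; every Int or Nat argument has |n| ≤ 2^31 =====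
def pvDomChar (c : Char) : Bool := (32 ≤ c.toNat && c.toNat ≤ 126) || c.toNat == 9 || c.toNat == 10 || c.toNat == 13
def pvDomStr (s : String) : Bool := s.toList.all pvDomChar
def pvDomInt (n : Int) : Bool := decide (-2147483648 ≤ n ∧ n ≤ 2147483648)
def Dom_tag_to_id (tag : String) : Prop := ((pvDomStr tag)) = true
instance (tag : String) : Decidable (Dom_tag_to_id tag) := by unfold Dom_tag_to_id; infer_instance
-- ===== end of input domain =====

-- B replaces A's left-to-right Horner accumulation (value*14 + TAG_CHARS.index)
-- by a right-to-left positional sum over a precomputed digit dictionary and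
-- bit operations for the high/low split; objective: alternative.

-- ===== PORT A =====
def pvTagChars : List Char := "0289PYLQGRJCUV".toList

-- _clean_tag: tag.strip().upper().replace('#','').replace('O','0').replace('B','8')
def pvCleanTag (tag : String) : List Char :=
  PySem.Chars.replace (PySem.Chars.replace (PySem.Chars.replace
    (PySem.Chars.upper (PySem.Chars.strip tag.toList)) ['#'] []) ['O'] ['0']) ['B'] ['8']

def tag_to_id (tag : String) : Int × Int :=
  let t := pvCleanTag tag
  -- TAG_CHARS.index raises ValueError for a foreign char; Pre_ excludes those
  -- inputs, so the getD default is never reached under the claim.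
  let value : Int := t.foldl (fun v c => v * 14 + (((PySem.List.index? pvTagChars c).getD 0 : Nat) : Int)) 0
  let high := PySem.Int.mod value 256
  (high, (value - high) >>> (8 : Nat))

-- ===== PORT B =====
-- _DIGITS = {c: i for i, c in enumerate(TAG_CHARS)}
def pvDigits : PySem.Dict Char Int :=
  (PySem.List.enumerate pvTagChars).foldl (fun d p => d.insert p.2 p.1) PySem.Dict.empty

def tag_to_id_alt (tag : String) : Int × Int :=
  let t := pvCleanTag tag
  -- _DIGITS[char] raises KeyError for a foreign char; Pre_ excludes those inputs.
  let vp := t.reverse.foldl (fun (vp : Int × Int) c => (vp.1 + (pvDigits.getD c 0) * vp.2, vp.2 * 14)) (0, 1)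
  (PySem.Int.band vp.1 255, vp.1 >>> (8 : Nat))

-- ===== PRECONDITION & SPEC =====
-- Pre_ admits exactly the tags whose cleaned form uses only TAG_CHARS: elsewhere
-- A raises ValueError (and B raises KeyError), so nothing is claimed there.
def Pre_tag_to_id (tag : String) : Prop :=
  ((pvCleanTag tag).all (fun c => pvTagChars.contains c)) = true
instance (tag : String) : Decidable (Pre_tag_to_id tag) := by unfold Pre_tag_to_id; infer_instance

def pvWitness_tag_to_id : String := "#2PP0LY"

def Spec_tag_to_id (tag : String) (out : Int × Int) : Prop := out = tag_to_id_alt tag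
instance (tag : String) (out : Int × Int) : Decidable (Spec_tag_to_id tag out) := by unfold Spec_tag_to_id; infer_instance

-- ===== CLAIM (what is proved, stated in full; the proofs are below) =====
def Claim_equal_tag_to_id : Prop := ∀ (tag : String), Dom_tag_to_id tag → Pre_tag_to_id tag → Spec_tag_to_id tag (tag_to_id tag)

-- ===== LEMMAS AND PROOFS =====

-- the digit value A extracts for a char (0 off the alphabet, where Pre_ excludes)
def pvDigA (c : Char) : Int := (((PySem.List.index? pvTagChars c).getD 0 : Nat) : Int)

-- B's dictionary lookup and A's index agree on EVERY char (both default to 0)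
theorem pvDig_eq (c : Char) : pvDigits.getD c 0 = pvDigA c := by
  have hd : pvDigits = PySem.Dict.mk [('0',0),('2',1),('8',2),('9',3),('P',4),('Y',5),('L',6),('Q',7),('G',8),('R',9),('J',10),('C',11),('U',12),('V',13)] := by decide
  have ht : pvTagChars = ['0','2','8','9','P','Y','L','Q','G','R','J','C','U','V'] := by decide
  by_cases h : c ∈ pvTagChars
  · rw [ht] at h
    simp only [List.mem_cons, List.not_mem_nil, or_false] at h
    rcases h with rfl|rfl|rfl|rfl|rfl|rfl|rfl|rfl|rfl|rfl|rfl|rfl|rfl|rfl <;> decide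
  · have h1 : PySem.List.index? pvTagChars c = none := (PySem.List.index?_eq_none_iff _ _).mpr h
    rw [PySem.List.index?_eq_idxOf?] at h1
    rw [ht] at h
    simp only [List.mem_cons, List.not_mem_nil, or_false, not_or] at h
    obtain ⟨h0,h2,h3,h4,h5,h6,h7,h8,h9,h10,h11,h12,h13,h14⟩ := h
    simp [pvDigA, h1, hd, PySem.Dict.getD, PySem.Dict.get?,
      Ne.symm h0, Ne.symm h2, Ne.symm h3, Ne.symm h4, Ne.symm h5, Ne.symm h6, Ne.symm h7,
      Ne.symm h8, Ne.symm h9, Ne.symm h10, Ne.symm h11, Ne.symm h12, Ne.symm h13, Ne.symm h14]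

theorem pvDigA_nonneg (c : Char) : 0 ≤ pvDigA c := Int.natCast_nonneg _

-- Horner fold with an arbitrary accumulator
theorem pv_horner (l : List Char) (a : Int) :
    l.foldl (fun v c => v * 14 + pvDigA c) a
      = a * 14 ^ l.length + l.foldl (fun v c => v * 14 + pvDigA c) 0 := by
  induction l generalizing a with
  | nil => simp
  | cons c l ih =>
    simp only [List.foldl_cons, List.length_cons]
    rw [ih (a * 14 + pvDigA c), ih (0 * 14 + pvDigA c)]
    ring

-- B's right-to-left positional fold computes the same base-14 value
theorem pv_positional (l : List Char) (v p : Int) :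
    l.reverse.foldl (fun (vp : Int × Int) c => (vp.1 + (pvDigits.getD c 0) * vp.2, vp.2 * 14)) (v, p)
      = (v + p * l.foldl (fun v c => v * 14 + pvDigA c) 0, p * 14 ^ l.length) := by
  induction l generalizing v p with
  | nil => simp
  | cons c l ih =>
    simp only [List.reverse_cons, List.foldl_append, List.foldl_cons, List.foldl_nil,
      List.length_cons, ih]
    rw [pv_horner l (0 * 14 + pvDigA c), pvDig_eq]
    refine Prod.ext ?_ ?_ <;> simp <;> ring

theorem pv_value_nonneg (l : List Char) :
    0 ≤ l.foldl (fun v c => v * 14 + pvDigA c) 0 := by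
  suffices h : ∀ a : Int, 0 ≤ a → 0 ≤ l.foldl (fun v c => v * 14 + pvDigA c) a from h 0 le_rfl
  induction l with
  | nil => exact fun a ha => ha
  | cons c l ih =>
    intro a ha
    exact ih _ (by have := pvDigA_nonneg c; nlinarith)

theorem pv_mod_cast (n : Nat) : PySem.Int.mod (n : Int) 256 = ((n % 256 : Nat) : Int) := by
  unfold PySem.Int.mod
  rw [Int.fmod_eq_emod]
  push_cast; rfl

theorem pv_band_cast (n : Nat) : PySem.Int.band (n : Int) 255 = ((n &&& 255 : Nat) : Int) := by
  have := PySem.Int.band_natCast n 255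
  simpa using this

-- the %/subtract/shift split equals the bit-operation split on nonnegative values
theorem pv_split_eq (v : Int) (hv : 0 ≤ v) :
    (PySem.Int.mod v 256, (v - PySem.Int.mod v 256) >>> (8:Nat)) = (PySem.Int.band v 255, v >>> (8:Nat)) := by
  obtain ⟨n, rfl⟩ := Int.eq_ofNat_of_zero_le hv
  rw [pv_mod_cast, pv_band_cast, Nat.and_two_pow_sub_one_eq_mod n 8]
  have h1 : ((n:Int) - ((n % 256 : Nat) : Int)) = (((n - n % 256 : Nat)) : Int) := by omega
  rw [h1]
  have h2 : ∀ (m : Nat), ((m:Int) >>> (8:Nat)) = ((m >>> 8 : Nat) : Int) := fun m => by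
    exact_mod_cast (Int.natCast_shiftRight m 8).symm
  rw [h2, h2]
  congr 2
  simp only [Nat.shiftRight_eq_div_pow]
  omega

-- ===== VERDICT (by name: the statement is the Claim_ definition above) =====
theorem tag_to_id_spec : Claim_equal_tag_to_id := by
  intro tag _ _
  unfold Spec_tag_to_id tag_to_id tag_to_id_alt
  show (PySem.Int.mod ((pvCleanTag tag).foldl (fun v c => v * 14 + pvDigA c) 0) 256,
        ((pvCleanTag tag).foldl (fun v c => v * 14 + pvDigA c) 0
          - PySem.Int.mod ((pvCleanTag tag).foldl (fun v c => v * 14 + pvDigA c) 0) 256) >>> (8:Nat))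
      = (PySem.Int.band ((pvCleanTag tag).reverse.foldl
            (fun (vp : Int × Int) c => (vp.1 + (pvDigits.getD c 0) * vp.2, vp.2 * 14)) (0, 1)).1 255,
         ((pvCleanTag tag).reverse.foldl
            (fun (vp : Int × Int) c => (vp.1 + (pvDigits.getD c 0) * vp.2, vp.2 * 14)) (0, 1)).1 >>> (8:Nat))
  rw [pv_positional]
  simp only [one_mul, zero_add]
  exact pv_split_eq _ (pv_value_nonneg _)
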